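-- pv_equiv track=rewrite | github.com/henriquegodoi2024/price-analysis-and-grid-operations | stock_price_analyzer.py | min_change_day
-- ===== SOURCE A (Python) =====
-- def min_change_day(list1):
--     """computes and returns the index of the later day with smallest adjacent change."""
--     min_change = abs(list1[0]-list1[1])
--     change_day = 1
--     for i in range(len(list1)-1):
--         change = abs(list1[i]-list1[i+1])
--         if change < min_change:
--             min_change = change
--             change_day = i+1
--     return change_day
-- ===== SOURCE B (Python) =====
-- def min_change_day(list1):
--     """computes and returns the index of the later day with smallest adjacent change."""
--     changes = [abs(a - b) for a, b in zip(list1, list1[1:])]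
--
--     def best(lo, hi):
--         # (smallest change, its later-day index) over changes[lo:hi], by halving;
--         # ties go to the left half, i.e. to the earliest day
--         if hi - lo <= 1:
--             return changes[lo], lo + 1
--         mid = (lo + hi) // 2
--         left = best(lo, mid)
--         right = best(mid, hi)
--         return left if left[0] <= right[0] else right
--
--     return best(0, len(changes))[1]
-- ===== Notes on version B (the rewrite author's own statement) =====
-- stated objective: alternative
-- what changed: Builds the table of adjacent absolute differences once and finds its minimum by divide-and-conquer (recursive halving, ties merged to the left half so the earliest day wins), instead of A's left-to-right running-min loop with hand-kept day bookkeeping.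
import Mathlib
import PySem

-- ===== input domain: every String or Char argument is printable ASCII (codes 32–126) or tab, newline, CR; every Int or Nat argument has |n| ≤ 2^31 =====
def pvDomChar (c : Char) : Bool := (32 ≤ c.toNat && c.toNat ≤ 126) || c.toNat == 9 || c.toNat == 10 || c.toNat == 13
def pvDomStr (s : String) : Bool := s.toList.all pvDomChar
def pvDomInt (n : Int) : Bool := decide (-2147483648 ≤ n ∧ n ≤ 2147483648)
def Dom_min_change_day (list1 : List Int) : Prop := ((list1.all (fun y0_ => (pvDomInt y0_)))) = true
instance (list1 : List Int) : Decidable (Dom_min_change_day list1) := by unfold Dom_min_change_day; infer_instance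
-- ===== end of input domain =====

-- B finds the minimum adjacent change by divide-and-conquer over the difference table (ties to the left
-- half) instead of A's left-to-right running-min loop (objective: alternative; return value only).

-- ===== PORT A =====
def min_change_day (list1 : List Int) : Int :=
  match PySem.List.pyGet? list1 0, PySem.List.pyGet? list1 1 with
  | some a0, some a1 =>
    (((PySem.List.pyRange 0 ((list1.length : Int) - 1)).foldl
      (fun (st : Int × Int) i =>
        -- list1[i], list1[i+1]: i ∈ range(len-1), so both accesses are in range; pyGetD is exact here
        let change := |PySem.List.pyGetD list1 i 0 - PySem.List.pyGetD list1 (i + 1) 0|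
        if change < st.1 then (change, i + 1) else st)
      (|a0 - a1|, 1)).2)
  | _, _ => 0

-- ===== PORT B =====
-- the inner 'best(lo, hi)': divide and conquer over changes[lo:hi]; inside Pre_ the access
-- changes[lo] is always in range, so getD is exact there
def bestRec (cs : List Int) (lo hi : Nat) : Int × Int :=
  if hi ≤ lo + 1 then (cs.getD lo 0, (lo : Int) + 1)
  else
    let mid := (lo + hi) / 2
    let left := bestRec cs lo mid
    let right := bestRec cs mid hi
    if left.1 ≤ right.1 then left else right
termination_by hi - lo
decreasing_by all_goals omega

def min_change_day_alt (list1 : List Int) : Int :=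
  let changes := (list1.zip (PySem.List.slice list1 (some 1))).map (fun p => |p.1 - p.2|)
  (bestRec changes 0 changes.length).2

-- ===== PRECONDITION & SPEC =====
-- Pre_ excludes exactly the lists of length < 2, on which A raises IndexError (at list1[0] or list1[1]).
def Pre_min_change_day (list1 : List Int) : Prop := 2 ≤ list1.length
instance (list1 : List Int) : Decidable (Pre_min_change_day list1) := by unfold Pre_min_change_day; infer_instance
def pvWitness_min_change_day : List Int := ([3, 5, 4])

def Spec_min_change_day (list1 : List Int) (out : Int) : Prop := out = min_change_day_alt list1
instance (list1 : List Int) (out : Int) : Decidable (Spec_min_change_day list1 out) := by unfold Spec_min_change_day; infer_instance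

-- ===== CLAIM (what is proved, stated in full; the proofs are below) =====
def Claim_equal_min_change_day : Prop := ∀ (list1 : List Int), Dom_min_change_day list1 → Pre_min_change_day list1 → Spec_min_change_day list1 (min_change_day list1)

-- ===== LEMMAS AND PROOFS =====

-- the `changes` table of B, as a name for the proofs
def chTbl (l : List Int) : List Int := (l.zip (PySem.List.slice l (some 1))).map (fun p => |p.1 - p.2|)
lemma chTbl_length (l : List Int) : (chTbl l).length = l.length - 1 := by
  simp [chTbl, PySem.List.slice_from (l) (a := 1) (by norm_num)]
lemma chTbl_getD (l : List Int) {k : Nat} (hk : k < l.length - 1) :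
    (chTbl l).getD k 0 = |l.getD k 0 - l.getD (k + 1) 0| := by
  have h1 : k < (chTbl l).length := by rw [chTbl_length]; omega
  rw [List.getD_eq_getElem _ _ h1, List.getD_eq_getElem _ _ (by omega : k < l.length),
      List.getD_eq_getElem _ _ (by omega : k + 1 < l.length)]
  simp [chTbl, PySem.List.slice_from (l) (a := 1) (by norm_num)]

-- A's loop: the running minimum and the earliest day achieving it
lemma loopInv (cs : List Int) : ∀ (m : Nat), m ≤ cs.length →
    ∃ j : Nat, (j = 0 ∨ j < m) ∧
      (List.range m).foldl
          (fun (st : Int × Int) k => if cs.getD k 0 < st.1 then (cs.getD k 0, (k : Int) + 1) else st)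
          (cs.getD 0 0, 1)
        = ((cs.take m).foldl min (cs.getD 0 0), (j : Int) + 1) ∧
      cs.getD j 0 = (cs.take m).foldl min (cs.getD 0 0) ∧
      ∀ i < j, (cs.take m).foldl min (cs.getD 0 0) < cs.getD i 0 := by
  intro m
  induction m with
  | zero => intro _; exact ⟨0, Or.inl rfl, by simp, by simp, by omega⟩
  | succ m ih =>
    intro hm
    obtain ⟨j, hj, hfold, hval, hmin⟩ := ih (by omega)
    have hmlen : m < cs.length := by omega
    have hvm : cs.getD m 0 = cs[m] := List.getD_eq_getElem _ _ hmlen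
    have htake : cs.take (m + 1) = cs.take m ++ [cs[m]] := by
      rw [List.take_add_one]; simp [List.getElem?_eq_getElem hmlen]
    have hMsucc : (cs.take (m + 1)).foldl min (cs.getD 0 0)
        = min ((cs.take m).foldl min (cs.getD 0 0)) (cs.getD m 0) := by
      rw [htake, List.foldl_append, hvm]; simp
    have hprefix : ∀ i < m, (cs.take m).foldl min (cs.getD 0 0) ≤ cs.getD i 0 := by
      intro i hi
      have hilen : i < cs.length := by omega
      have hmem : cs.getD i 0 ∈ cs.take m := by
        rw [List.getD_eq_getElem _ _ hilen]
        have : (cs.take m)[i]'(by simp [List.length_take]; omega) = cs[i] := List.getElem_take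
        exact this ▸ List.getElem_mem _
      exact (PySem.List.foldl_min_le _ _).2 _ hmem
    rw [List.range_succ, List.foldl_append, hfold]
    simp only [List.foldl_cons, List.foldl_nil]
    by_cases hv : cs.getD m 0 < (cs.take m).foldl min (cs.getD 0 0)
    · refine ⟨m, Or.inr (by omega), ?_, ?_, ?_⟩
      · rw [if_pos hv, hMsucc, min_eq_right (le_of_lt hv)]
      · rw [hMsucc, min_eq_right (le_of_lt hv)]
      · intro i hi
        rw [hMsucc, min_eq_right (le_of_lt hv)]
        exact lt_of_lt_of_le hv (hprefix i hi)
    · refine ⟨j, ?_, ?_, ?_, ?_⟩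
      · rcases hj with h | h
        · exact Or.inl h
        · exact Or.inr (by omega)
      · rw [if_neg hv, hMsucc, min_eq_left (not_lt.mp hv)]
      · rw [hMsucc, min_eq_left (not_lt.mp hv)]; exact hval
      · intro i hi; rw [hMsucc, min_eq_left (not_lt.mp hv)]; exact hmin i hi

-- B's recursion: bestRec returns the segment's minimum together with the earliest day achieving it
lemma bestRec_spec (cs : List Int) : ∀ (d lo hi : Nat), hi - lo ≤ d → lo < hi → hi ≤ cs.length →
    ∃ j : Nat, lo ≤ j ∧ j < hi ∧
      bestRec cs lo hi = (cs.getD j 0, (j : Int) + 1) ∧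
      (∀ i, lo ≤ i → i < hi → cs.getD j 0 ≤ cs.getD i 0) ∧
      (∀ i, lo ≤ i → i < j → cs.getD j 0 < cs.getD i 0) := by
  intro d
  induction d with
  | zero => intro lo hi h1 h2 _; omega
  | succ d ih =>
    intro lo hi hd hlt hlen
    rw [bestRec]
    by_cases hbase : hi ≤ lo + 1
    · refine ⟨lo, le_rfl, hlt, by rw [if_pos hbase], ?_, by omega⟩
      intro i hli hih
      have : i = lo := by omega
      simp [this]
    · have hmid1 : lo < (lo + hi) / 2 := by omega
      have hmid2 : (lo + hi) / 2 < hi := by omega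
      obtain ⟨jL, hL1, hL2, hLeq, hLmin, hLstrict⟩ :=
        ih lo ((lo + hi) / 2) (by omega) hmid1 (by omega)
      obtain ⟨jR, hR1, hR2, hReq, hRmin, hRstrict⟩ :=
        ih ((lo + hi) / 2) hi (by omega) hmid2 hlen
      rw [if_neg hbase]
      simp only [hLeq, hReq]
      by_cases hc : cs.getD jL 0 ≤ cs.getD jR 0
      · refine ⟨jL, hL1, by omega, by rw [if_pos hc], ?_, hLstrict⟩
        intro i hli hih
        by_cases hi2 : i < (lo + hi) / 2
        · exact hLmin i hli hi2
        · exact le_trans hc (hRmin i (by omega) hih)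
      · push_neg at hc
        refine ⟨jR, by omega, hR2, by rw [if_neg (not_le.mpr hc)], ?_, ?_⟩
        · intro i hli hih
          by_cases hi2 : i < (lo + hi) / 2
          · exact le_trans (le_of_lt hc) (hLmin i hli hi2)
          · exact hRmin i (by omega) hih
        · intro i hli hij
          by_cases hi2 : i < (lo + hi) / 2
          · exact lt_of_lt_of_le hc (hLmin i hli hi2)
          · exact hRstrict i (by omega) hij

-- ===== VERDICT (by name: the statement is the Claim_ definition above) =====
theorem min_change_day_spec : Claim_equal_min_change_day := by
  intro l _ hpre
  have h2 : 2 ≤ l.length := hpre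
  show min_change_day l = min_change_day_alt l
  have hget : ∀ k : Nat, k < l.length → PySem.List.pyGet? l (k : Int) = some (l.getD k 0) := by
    intro k hk
    rw [PySem.List.pyGet?_of_nonneg_of_lt l (by positivity) (by exact_mod_cast hk),
        List.getD_eq_getElem _ _ hk]
    simp [List.getElem?_eq_getElem hk]
  have hg0 : PySem.List.pyGet? l 0 = some (l.getD 0 0) := by exact_mod_cast hget 0 (by omega)
  have hg1 : PySem.List.pyGet? l 1 = some (l.getD 1 0) := by exact_mod_cast hget 1 (by omega)
  have hgd : ∀ k : Nat, k < l.length → PySem.List.pyGetD l (k : Int) 0 = l.getD k 0 := by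
    intro k hk
    rw [PySem.List.pyGetD_eq_getElem l 0 (by positivity) (by exact_mod_cast hk),
        List.getD_eq_getElem _ _ hk]
    simp
  have hlen : (chTbl l).length = l.length - 1 := chTbl_length l
  obtain ⟨j, hj, hfold, hval, hmin⟩ := loopInv (chTbl l) (chTbl l).length le_rfl
  rw [List.take_length] at hval hmin hfold
  have hjlt : j < (chTbl l).length := by rcases hj with h | h <;> omega
  -- A's side
  have hA : min_change_day l = (j : Int) + 1 := by
    rw [min_change_day, hg0, hg1]
    dsimp only
    have hn1 : ((l.length : Int) - 1) = ((l.length - 1 : Nat) : Int) := by omega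
    rw [hn1, PySem.List.pyRange_zero_natCast, List.foldl_map]
    have hbody := PySem.List.foldl_congr_mem
      (l := List.range (l.length - 1))
      (init := ((|l.getD 0 0 - l.getD 1 0|, (1 : Int)) : Int × Int))
      (f := fun (st : Int × Int) (k : Nat) =>
        if |PySem.List.pyGetD l (k : Int) 0 - PySem.List.pyGetD l ((k : Int) + 1) 0| < st.1
        then (|PySem.List.pyGetD l (k : Int) 0 - PySem.List.pyGetD l ((k : Int) + 1) 0|, (k : Int) + 1)
        else st)
      (g := fun (st : Int × Int) (k : Nat) =>
        if (chTbl l).getD k 0 < st.1 then ((chTbl l).getD k 0, (k : Int) + 1) else st)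
      (by
        intro st k hk
        have hk' : k < l.length - 1 := List.mem_range.mp hk
        have h1 : ((k : Int) + 1) = ((k + 1 : Nat) : Int) := by push_cast; ring
        dsimp only
        rw [hgd k (by omega), h1, hgd (k + 1) (by omega), chTbl_getD l hk'])
    rw [hbody]
    rw [show (|l.getD 0 0 - l.getD 1 0|, (1 : Int)) = ((chTbl l).getD 0 0, (1 : Int)) by
      rw [chTbl_getD l (by omega)]]
    rw [← hlen, hfold]
  -- global lower bound of A's fold-minimum, for the comparison with B's argmin
  have hglobal : ∀ i < (chTbl l).length,
      (chTbl l).foldl min ((chTbl l).getD 0 0) ≤ (chTbl l).getD i 0 := by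
    intro i hi
    have hmem : (chTbl l).getD i 0 ∈ chTbl l := by
      rw [List.getD_eq_getElem _ _ hi]; exact List.getElem_mem _
    exact (PySem.List.foldl_min_le _ _).2 _ hmem
  -- B's side
  obtain ⟨j', hj'lo, hj'hi, hbeq, hbmin, hbstrict⟩ :=
    bestRec_spec (chTbl l) (chTbl l).length 0 (chTbl l).length le_rfl (by omega) le_rfl
  have hjj : j' = j := by
    rcases lt_trichotomy j' j with h | h | h
    · have h1 := hmin j' h           -- min < cs[j']
      have h2 := hbmin j (by omega) hjlt  -- cs[j'] ≤ cs[j] = min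
      rw [hval] at h2; omega
    · exact h
    · have h1 := hbstrict j (by omega) h  -- cs[j'] < cs[j] = min
      have h2 := hglobal j' hj'hi          -- min ≤ cs[j']
      rw [hval] at h1; omega
  have hB : min_change_day_alt l = (j : Int) + 1 := by
    show (bestRec (chTbl l) 0 (chTbl l).length).2 = (j : Int) + 1
    rw [hbeq, hjj]
  rw [hA, hB]
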